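-- pv_equiv track=rewrite | github.com/georggoetz/hackerrank-py | Algorithm/Implementation/append_and_delete.py | appendAndDelete
-- ===== SOURCE A (Python) =====
-- def appendAndDelete(s, t, k):
--     n = len(t)
--     while len(s) + k > n:
--         if len(s) > 0:
--             s = s[:-1]
--         k -= 1
--     s += t[-k:]
--     return 'Yes' if s == t else 'No'
-- ===== SOURCE B (Python) =====
-- def appendAndDelete(s, t, k):
--     n, L = len(t), len(s)
--     d = L + k - n
--     if d <= 0:
--         s2, k2 = s, k
--     else:
--         need = (d + 1) // 2
--         if need <= L:
--             s2, k2 = s[:L - need], k - need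
--         else:
--             s2, k2 = '', n
--     return 'Yes' if s2 + t[-k2:] == t else 'No'
-- ===== Notes on version B (the rewrite author's own statement) =====
-- stated objective: faster
-- what changed: A's while-loop that deletes one character (and decrements k) per iteration is replaced by a closed-form arithmetic computation of the loop's final trimmed string and final k, followed by the same suffix-append comparison.
import Mathlib
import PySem

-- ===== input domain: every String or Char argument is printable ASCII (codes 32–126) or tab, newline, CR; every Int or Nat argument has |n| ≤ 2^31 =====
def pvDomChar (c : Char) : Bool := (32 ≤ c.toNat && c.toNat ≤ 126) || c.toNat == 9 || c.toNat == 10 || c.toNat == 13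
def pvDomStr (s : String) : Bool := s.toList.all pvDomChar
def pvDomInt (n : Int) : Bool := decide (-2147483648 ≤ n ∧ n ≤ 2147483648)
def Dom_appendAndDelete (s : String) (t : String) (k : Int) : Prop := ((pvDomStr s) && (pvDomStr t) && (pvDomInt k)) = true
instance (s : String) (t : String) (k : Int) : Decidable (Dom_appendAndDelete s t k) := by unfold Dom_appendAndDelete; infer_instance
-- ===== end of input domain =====

-- B replaces A's one-character-at-a-time trimming loop (O(len(s)+k) iterations) by a
-- closed-form computation of the loop's final state; objective: faster (asymptotic).

-- ===== PORT A =====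
-- the while-loop of A: while len(s) + k > n: if len(s) > 0: s = s[:-1]; k -= 1
def aLoop (n : Int) (s : List Char) (k : Int) : List Char × Int :=
  if _h : (s.length : Int) + k > n then
    if _h2 : 0 < s.length then
      aLoop n (PySem.List.slice s none (some (-1))) (k - 1)
    else
      aLoop n s (k - 1)
  else (s, k)
termination_by ((s.length : Int) + k - n).toNat
decreasing_by
  · simp only [PySem.List.slice_to_neg_one, List.length_dropLast]; omega
  · omega

def appendAndDelete (s : String) (t : String) (k : Int) : String :=
  let n : Int := t.toList.length
  let p := aLoop n s.toList k
  let s2 := p.1 ++ PySem.List.slice t.toList (some (-p.2)) none   -- s += t[-k:]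
  if s2 = t.toList then "Yes" else "No"

-- ===== PORT B =====
-- closed form of the trimmed state (s2, k2) computed by Source B's arithmetic branch
def bPair (n : Int) (s : List Char) (k : Int) : List Char × Int :=
  let d := (s.length : Int) + k - n
  if d ≤ 0 then (s, k)
  else
    let need := PySem.Int.floordiv (d + 1) 2
    if need ≤ (s.length : Int) then
      (PySem.List.slice s none (some ((s.length : Int) - need)), k - need)   -- s[:L-need]
    else ([], n)

def appendAndDelete_alt (s : String) (t : String) (k : Int) : String :=
  let n : Int := t.toList.length
  let p := bPair n s.toList k
  let s2 := p.1 ++ PySem.List.slice t.toList (some (-p.2)) none   -- s2 + t[-k2:]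
  if s2 = t.toList then "Yes" else "No"

-- ===== PRECONDITION & SPEC =====
def Spec_appendAndDelete (s : String) (t : String) (k : Int) (out : String) : Prop := out = appendAndDelete_alt s t k
instance (s : String) (t : String) (k : Int) (out : String) : Decidable (Spec_appendAndDelete s t k out) := by unfold Spec_appendAndDelete; infer_instance

-- ===== CLAIM (what is proved, stated in full; the proofs are below) =====
def Claim_equal_appendAndDelete : Prop := ∀ (s : String) (t : String) (k : Int), Dom_appendAndDelete s t k → Spec_appendAndDelete s t k (appendAndDelete s t k)

-- ===== LEMMAS AND PROOFS =====

-- one trimming step with s nonempty leaves the closed form unchanged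
theorem bPair_step_pos (n : Int) (s : List Char) (k : Int)
    (hk : n < (s.length : Int) + k) (hs : 0 < s.length) :
    bPair n s.dropLast (k - 1) = bPair n s k := by
  have hfd : ∀ a : Int, PySem.Int.floordiv a 2 = a / 2 := fun a =>
    PySem.Int.floordiv_eq_ediv_of_pos (by omega)
  have hL : ((s.length - 1 : Nat) : Int) = (s.length : Int) - 1 := by omega
  simp only [bPair, List.length_dropLast, hfd, hL]
  split_ifs with h1 h2 h3 h4 h5 h6 h7 h8 <;>
    first
    | (exfalso; omega)
    | rfl
    | (-- d' ≤ 0 (one last step): need = 1, s[:L-1] = dropLast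
       have hneed : ((s.length : Int) + k - n + 1) / 2 = 1 := by omega
       rw [hneed, PySem.List.slice_to s (b := (s.length : Int) - 1) (by omega)]
       have he : ((s.length : Int) - 1).toNat = s.length - 1 := by omega
       rw [he, ← List.dropLast_eq_take])
    | (-- both trim: take on dropLast = take on s
       rw [PySem.List.slice_to s.dropLast (b := (s.length : Int) - 1 - (((s.length : Int) - 1 + (k - 1) - n + 1) / 2)) (by omega),
         PySem.List.slice_to s (b := (s.length : Int) - ((s.length : Int) + k - n + 1) / 2) (by omega)]
       have he : ((s.length : Int) - 1 - (((s.length : Int) - 1 + (k - 1) - n + 1) / 2)).toNat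
           = ((s.length : Int) - ((s.length : Int) + k - n + 1) / 2).toNat := by omega
       rw [he, List.dropLast_eq_take, List.take_take]
       have hm : min (((s.length : Int) - ((s.length : Int) + k - n + 1) / 2).toNat) (s.length - 1)
           = ((s.length : Int) - ((s.length : Int) + k - n + 1) / 2).toNat := by omega
       rw [hm]
       simp only [Prod.mk.injEq]
       exact ⟨trivial, by omega⟩)

-- a decrement with s already empty leaves the closed form unchanged
theorem bPair_step_zero (n : Int) (k : Int) (hk : n < k) :
    bPair n ([] : List Char) (k - 1) = bPair n ([] : List Char) k := by
  have hfd : ∀ a : Int, PySem.Int.floordiv a 2 = a / 2 := fun a =>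
    PySem.Int.floordiv_eq_ediv_of_pos (by omega)
  simp only [bPair, List.length_nil, hfd]
  split_ifs <;> first
    | (exfalso; omega)
    | rfl
    | (simp only [Prod.mk.injEq]; exact ⟨trivial, by omega⟩)

-- A's while loop computes exactly B's closed form (for every n)
theorem aLoop_eq (n : Int) (s : List Char) (k : Int) : aLoop n s k = bPair n s k := by
  rw [aLoop]
  by_cases h : (s.length : Int) + k > n
  · rw [dif_pos h]
    by_cases h2 : 0 < s.length
    · rw [dif_pos h2, aLoop_eq n (PySem.List.slice s none (some (-1))) (k - 1),
        PySem.List.slice_to_neg_one, bPair_step_pos n s k h h2]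
    · have hs : s = [] := List.eq_nil_of_length_eq_zero (by omega)
      subst hs
      rw [dif_neg h2, aLoop_eq n [] (k - 1), bPair_step_zero n k (by simpa using h)]
  · rw [dif_neg h]
    simp only [bPair]
    rw [if_pos (by omega)]
termination_by ((s.length : Int) + k - n).toNat
decreasing_by
  · simp only [PySem.List.slice_to_neg_one, List.length_dropLast]; omega
  · simp only [List.length_nil] at *; omega

-- ===== VERDICT (by name: the statement is the Claim_ definition above) =====
theorem appendAndDelete_spec : Claim_equal_appendAndDelete := by
  intro s t k _
  unfold Spec_appendAndDelete appendAndDelete appendAndDelete_alt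
  simp only [aLoop_eq]
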